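-- pv_equiv track=rewrite | github.com/mmrakib/unsw_courses | cs2041/test08/three_vowel_echo.py | ContainsConsecutiveVowels
-- ===== SOURCE A (Python) =====
-- import operator
--
-- vowels = 'aeiouAEIOU'
--
-- def IsVowel(letter):
--     if (operator.countOf(vowels, letter) > 0):
--         return True
--     return False
--
-- def ContainsConsecutiveVowels(word):
--     cons = 0
--     for letter in word:
--         if (IsVowel(letter)):
--             cons += 1
--         else:
--             cons = 0
--         if (cons >= 3):
--             return True
--     return False
-- ===== SOURCE B (Python) =====
-- vowels = 'aeiouAEIOU'
--
-- def ContainsConsecutiveVowels(word):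
--     return any(all(c in vowels for c in word[i:i+3]) for i in range(len(word) - 2))
-- ===== Notes on version B (the rewrite author's own statement) =====
-- stated objective: simpler
-- what changed: Replaces the stateful running counter with early return by a stateless sliding-window scan: test each length-3 window of the word for being all vowels via any/all over range(len(word)-2).
import Mathlib
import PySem

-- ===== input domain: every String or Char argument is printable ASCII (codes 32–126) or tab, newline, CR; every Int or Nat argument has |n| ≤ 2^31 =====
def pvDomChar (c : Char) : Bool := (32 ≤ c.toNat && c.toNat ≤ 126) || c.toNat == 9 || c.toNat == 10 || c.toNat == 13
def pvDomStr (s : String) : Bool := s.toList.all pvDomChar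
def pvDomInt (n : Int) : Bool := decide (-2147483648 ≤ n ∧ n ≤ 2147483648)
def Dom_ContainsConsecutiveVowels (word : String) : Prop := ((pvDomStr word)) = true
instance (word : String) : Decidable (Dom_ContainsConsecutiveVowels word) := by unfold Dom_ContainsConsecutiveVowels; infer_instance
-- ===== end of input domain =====

-- B replaces A's running-counter-with-early-return by a stateless sliding-window
-- any/all scan over index windows; objective: simpler (same O(n) cost).

-- ===== PORT A =====
def pvVowels : List Char := "aeiouAEIOU".toList

-- operator.countOf(vowels, letter) > 0
def IsVowel (letter : Char) : Bool := decide (pvVowels.count letter > 0)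

def pvLoopA : List Char → Int → Bool
  | [], _ => false
  | letter :: rest, cons =>
    let cons' : Int := if IsVowel letter then cons + 1 else 0
    if cons' ≥ 3 then true else pvLoopA rest cons'

def ContainsConsecutiveVowels (word : String) : Bool := pvLoopA word.toList 0

-- ===== PORT B =====
def IsVowelAlt (c : Char) : Bool := pvVowels.contains c

def ContainsConsecutiveVowels_alt (word : String) : Bool :=
  (List.range (word.toList.length - 2)).any
    (fun i => ((word.toList.drop i).take 3).all IsVowelAlt)

-- ===== PRECONDITION & SPEC =====
def Spec_ContainsConsecutiveVowels (word : String) (out : Bool) : Prop := out = ContainsConsecutiveVowels_alt word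
instance (word : String) (out : Bool) : Decidable (Spec_ContainsConsecutiveVowels word out) := by unfold Spec_ContainsConsecutiveVowels; infer_instance

-- ===== CLAIM (what is proved, stated in full; the proofs are below) =====
def Claim_equal_ContainsConsecutiveVowels : Prop := ∀ (word : String), Dom_ContainsConsecutiveVowels word → Spec_ContainsConsecutiveVowels word (ContainsConsecutiveVowels word)

-- ===== LEMMAS AND PROOFS =====

-- middle predicate: "some window of three consecutive vowels", structural form
def pvWin : List Char → Bool
  | a :: b :: c :: rest => (IsVowelAlt a && IsVowelAlt b && IsVowelAlt c) || pvWin (b :: c :: rest)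
  | _ => false

theorem isVowel_eq (c : Char) : IsVowel c = IsVowelAlt c := by
  simp [IsVowel, IsVowelAlt, List.count_pos_iff]

-- A's loop with cons ≤ 2 pending vowels behaves like pvWin on cons fake vowels ++ l
theorem loopA_win (l : List Char) : ∀ cons : Int, 0 ≤ cons → cons ≤ 2 →
    pvLoopA l cons = pvWin (List.replicate cons.toNat 'a' ++ l) := by
  induction l with
  | nil =>
    intro cons h0 h2
    interval_cases cons <;> simp [pvLoopA, pvWin, List.replicate]
  | cons c rest ih =>
    intro cons h0 h2
    have hv : IsVowelAlt 'a' = true := by decide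
    interval_cases cons <;>
      by_cases h : IsVowelAlt c <;>
        simp [pvLoopA, pvWin, List.replicate, isVowel_eq, h, hv,
          ih 0 (by norm_num) (by norm_num), ih 1 (by norm_num) (by norm_num),
          ih 2 (by norm_num) (by norm_num)] <;>
        cases rest with
        | nil => simp [pvWin]
        | cons b t =>
          cases t with
          | nil => simp [pvWin, h, hv]
          | cons d u => simp [pvWin, h, hv]

-- B's index/window scan equals pvWin
theorem alt_win (l : List Char) :
    (List.range (l.length - 2)).any (fun i => ((l.drop i).take 3).all IsVowelAlt) = pvWin l := by
  induction l with
  | nil => simp [pvWin]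
  | cons a rest ih =>
    cases rest with
    | nil => simp [pvWin]
    | cons b t =>
      cases t with
      | nil => simp [pvWin]
      | cons c u =>
        have hlen : (a :: b :: c :: u).length - 2 = (b :: c :: u).length - 2 + 1 := by
          simp
        rw [hlen, List.range_succ_eq_map, List.any_cons, List.any_map]
        have h1 : ((fun i => (((a :: b :: c :: u).drop i).take 3).all IsVowelAlt) ∘ Nat.succ)
            = fun i => (((b :: c :: u).drop i).take 3).all IsVowelAlt := by
          funext i; simp [Function.comp]
        rw [h1, ih]
        simp [pvWin, Bool.and_assoc]

-- ===== VERDICT (by name: the statement is the Claim_ definition above) =====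
theorem ContainsConsecutiveVowels_spec : Claim_equal_ContainsConsecutiveVowels := by
  intro word _
  unfold Spec_ContainsConsecutiveVowels ContainsConsecutiveVowels ContainsConsecutiveVowels_alt
  rw [alt_win, loopA_win word.toList 0 (by norm_num) (by norm_num)]
  simp
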